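-- pv_equiv track=rewrite | github.com/AnneJoJo/Algorithm | Structure/legacy/AmazonOA/packageAuto.py | solution
-- ===== SOURCE A (Python) =====
-- def solution(arr):
--     arr.sort()
--     for i in range(len(arr)):
--         if i == 0:
--             arr[i] = 1
--         else:
--             if arr[i] > arr[i-1]+1:
--                 arr[i] = arr[i-1]+1
--     return arr[-1]
-- ===== SOURCE B (Python) =====
-- def solution(arr):
--     arr.sort()
--     n = len(arr)
--     m = min([1] + [arr[j] - j for j in range(1, n)])
--     return (n - 1) + m
-- ===== Notes on version B (the rewrite author's own statement) =====
-- stated objective: simpler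
-- what changed: Replaces the in-place left-to-right clamp recurrence over the sorted array with a closed form: the answer is (n-1) plus the minimum of 1 and min over j>=1 of (sorted[j]-j), computed by one min over a comprehension.
import Mathlib
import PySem

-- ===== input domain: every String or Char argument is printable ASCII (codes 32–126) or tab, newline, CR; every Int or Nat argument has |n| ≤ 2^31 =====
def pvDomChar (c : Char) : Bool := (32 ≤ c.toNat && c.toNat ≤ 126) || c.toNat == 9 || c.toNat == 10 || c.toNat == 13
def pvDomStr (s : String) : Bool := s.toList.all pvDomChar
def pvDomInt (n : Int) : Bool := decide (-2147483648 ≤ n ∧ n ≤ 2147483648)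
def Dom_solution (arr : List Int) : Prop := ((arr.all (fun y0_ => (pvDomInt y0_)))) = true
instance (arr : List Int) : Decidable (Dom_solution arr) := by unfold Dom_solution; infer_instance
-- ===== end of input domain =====

-- B computes the same return value by a closed form (a single min over arr[j]-j) instead of the in-place clamp loop;
-- Python A also mutates its argument (sort + clamping writes) while B only sorts it: the equivalence proved is about the return value only.

-- ===== PORT A =====
def solution (arr : List Int) : Int :=
  let s := PySem.List.sorted arr (fun x => x) false
  let t := (List.range s.length).foldl (fun a (i : ℕ) =>
      if i = 0 then PySem.List.pySetD a (0 : Int) 1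
      else
        if PySem.List.pyGetD a (i : Int) 0 > PySem.List.pyGetD a ((i : Int) - 1) 0 + 1 then
          PySem.List.pySetD a (i : Int) (PySem.List.pyGetD a ((i : Int) - 1) 0 + 1)
        else a) s
  PySem.List.pyGetD t (-1) 0

-- ===== PORT B =====
def solution_alt (arr : List Int) : Int :=
  let s := PySem.List.sorted arr (fun x => x) false
  let n : Int := s.length
  let m := (PySem.List.min? ((1 : Int) ::
      (PySem.List.pyRange 1 n 1).map (fun j => PySem.List.pyGetD s j 0 - j)) (fun y => y)).getD 0
  (n - 1) + m

-- ===== PRECONDITION & SPEC =====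
-- Pre_ excludes only the empty list, on which A's final indexing of the last element raises IndexError.
def Pre_solution (arr : List Int) : Prop := arr ≠ []
instance (arr : List Int) : Decidable (Pre_solution arr) := by unfold Pre_solution; infer_instance
def pvWitness_solution : List Int := ([3, 1, 2] : List Int)

def Spec_solution (arr : List Int) (out : Int) : Prop := out = solution_alt arr
instance (arr : List Int) (out : Int) : Decidable (Spec_solution arr out) := by unfold Spec_solution; infer_instance

-- ===== CLAIM (what is proved, stated in full; the proofs are below) =====
def Claim_equal_solution : Prop := ∀ (arr : List Int), Dom_solution arr → Pre_solution arr → Spec_solution arr (solution arr)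

-- ===== LEMMAS AND PROOFS =====

-- the body of A's loop, named so the invariant lemmas can talk about it (defeq to the lambda in `solution`)
def stepA (a : List Int) (i : ℕ) : List Int :=
  if i = 0 then PySem.List.pySetD a (0 : Int) 1
  else
    if PySem.List.pyGetD a (i : Int) 0 > PySem.List.pyGetD a ((i : Int) - 1) 0 + 1 then
      PySem.List.pySetD a (i : Int) (PySem.List.pyGetD a ((i : Int) - 1) 0 + 1)
    else a

-- the clamped tail A's loop produces
def goList (prev : Int) : List Int → List Int
  | [] => []
  | y :: ys => min y (prev + 1) :: goList (min y (prev + 1)) ys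

-- A's running clamp value (the last element of the clamped list)
def clampF (xs : List Int) (p : Int) : Int := xs.foldl (fun p y => min y (p + 1)) p

-- B's running minimum of y - o over the suffix, with absolute offset o
def bfold : List Int → Int → Int → Int
  | [], _, m => m
  | y :: ys, o, m => bfold ys (o + 1) (min m (y - o))

theorem getD_append_len (l₁ : List Int) (y : Int) (l₂ : List Int) (d : Int) :
    (l₁ ++ y :: l₂).getD l₁.length d = y := by
  induction l₁ with
  | nil => simp
  | cons a l _ => simp

theorem set_append_len (l₁ : List Int) (y : Int) (l₂ : List Int) (v : Int) :
    (l₁ ++ y :: l₂).set l₁.length v = l₁ ++ v :: l₂ := by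
  induction l₁ with
  | nil => simp
  | cons a l ih => simp [ih]

theorem stepA_snoc (pre' : List Int) (prev y : Int) (ys : List Int) :
    stepA ((pre' ++ [prev]) ++ y :: ys) (pre'.length + 1)
      = (pre' ++ [prev]) ++ (min y (prev + 1)) :: ys := by
  have hassoc : (pre' ++ [prev]) ++ y :: ys = pre' ++ prev :: y :: ys := by simp
  have hlen : (pre' ++ [prev]).length = pre'.length + 1 := by simp
  have hg1 : PySem.List.pyGetD ((pre' ++ [prev]) ++ y :: ys) ((pre'.length + 1 : ℕ) : Int) 0 = y := by
    rw [PySem.List.pyGetD_natCast, ← hlen, getD_append_len]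
  have hcast : ((pre'.length + 1 : ℕ) : Int) - 1 = ((pre'.length : ℕ) : Int) := by push_cast; ring
  have hg0 : PySem.List.pyGetD ((pre' ++ [prev]) ++ y :: ys) (((pre'.length + 1 : ℕ) : Int) - 1) 0 = prev := by
    rw [hcast, PySem.List.pyGetD_natCast, hassoc, getD_append_len]
  unfold stepA
  rw [if_neg (Nat.succ_ne_zero _), hg1, hg0]
  by_cases h : y > prev + 1
  · rw [if_pos h, PySem.List.pySetD_natCast, ← hlen, set_append_len,
      min_eq_right (le_of_lt h)]
  · rw [if_neg h, min_eq_left (le_of_not_gt h)]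

theorem loopA : ∀ (rest pre' : List Int) (prev : Int),
    (List.range' (pre'.length + 1) rest.length).foldl stepA ((pre' ++ [prev]) ++ rest)
      = (pre' ++ [prev]) ++ goList prev rest := by
  intro rest
  induction rest with
  | nil => intro pre' prev; simp [goList]
  | cons y ys ih =>
    intro pre' prev
    rw [List.length_cons, List.range'_succ, List.foldl_cons, stepA_snoc]
    have h := ih (pre' ++ [prev]) (min y (prev + 1))
    simp only [List.length_append, List.length_cons, List.length_nil, List.append_assoc,
      List.cons_append, List.nil_append, Nat.zero_add] at h ⊢
    simpa [goList] using h

theorem foldA (x : Int) (xs : List Int) :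
    (List.range (x :: xs).length).foldl stepA (x :: xs) = 1 :: goList 1 xs := by
  rw [List.length_cons, List.range_eq_range', List.range'_succ, List.foldl_cons]
  have h0 : stepA (x :: xs) 0 = 1 :: xs := by
    simp [stepA, PySem.List.pySetD_of_nonneg]
  rw [h0]
  simpa using loopA xs [] 1

theorem lastGo : ∀ (ys : List Int) (prev : Int),
    (prev :: goList prev ys).getLast? = some (clampF ys prev) := by
  intro ys
  induction ys with
  | nil => intro prev; simp [goList, clampF]
  | cons y t ih =>
    intro prev
    show (prev :: min y (prev + 1) :: goList (min y (prev + 1)) t).getLast? = _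
    rw [List.getLast?_cons_cons, ih]
    rfl

theorem clampF_eq_bfold : ∀ (xs : List Int) (o m : Int),
    clampF xs (o - 1 + m) = (o - 1 + xs.length) + bfold xs o m := by
  intro xs
  induction xs with
  | nil => intro o m; simp [clampF, bfold]
  | cons y ys ih =>
    intro o m
    have h1 : clampF (y :: ys) (o - 1 + m) = clampF ys (min y (o - 1 + m + 1)) := rfl
    have h2 : min y (o - 1 + m + 1) = (o + 1) - 1 + min m (y - o) := by
      rcases le_total m (y - o) with h | h
      · rw [min_eq_right (by omega), min_eq_left h]; ring
      · rw [min_eq_left (by omega), min_eq_right h]; ring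
    rw [h1, h2, ih (o + 1) (min m (y - o))]
    show _ = (o - 1 + ((ys.length : Int) + 1)) + bfold ys (o + 1) (min m (y - o))
    ring

theorem bfoldB : ∀ (u : List Int) (s : List Int) (a m : Int), 0 ≤ a → s.drop a.toNat = u →
    ((PySem.List.pyRange a (s.length : Int) 1).map (fun j => PySem.List.pyGetD s j 0 - j)).foldl min m
      = bfold u a m := by
  intro u
  induction u with
  | nil =>
    intro s a m ha hd
    have hl : s.length - a.toNat = 0 := by
      have := congrArg List.length hd; simpa using this
    have : (s.length : Int) ≤ a := by omega
    rw [PySem.List.pyRange_one_eq_nil this]; simp [bfold]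
  | cons y ys ih =>
    intro s a m ha hd
    have hl : s.length - a.toNat = ys.length + 1 := by
      have := congrArg List.length hd; simpa using this
    have hlt : a < (s.length : Int) := by omega
    rw [PySem.List.pyRange_one_cons hlt]
    simp only [List.map_cons, List.foldl_cons]
    have hget : PySem.List.pyGetD s a 0 = y := by
      have h0 : (s.drop a.toNat)[0]? = some y := by rw [hd]; rfl
      rw [List.getElem?_drop] at h0
      rw [PySem.List.pyGetD_of_nonneg s 0 ha, List.getD_eq_getElem?_getD]
      simp only [Nat.add_zero] at h0
      rw [h0]
      rfl
    have hdrop : s.drop (a + 1).toNat = ys := by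
      have h1 : (a + 1).toNat = a.toNat + 1 := by omega
      rw [h1, ← List.drop_drop, hd]
      rfl
    rw [hget]
    exact ih s (a + 1) (min m (y - a)) (by omega) hdrop

-- ===== VERDICT (by name: the statement is the Claim_ definition above) =====
theorem solution_spec : Claim_equal_solution := by
  intro arr _ hpre
  unfold Spec_solution
  have hsne : PySem.List.sorted arr (fun x => x) false ≠ [] := by
    intro h; exact hpre ((PySem.List.sorted_eq_nil_iff arr (fun x => x) false).mp h)
  obtain ⟨x, xs, hs⟩ := List.exists_cons_of_ne_nil hsne
  have hA : solution arr
      = PySem.List.pyGetD ((List.range (PySem.List.sorted arr (fun x => x) false).length).foldl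
          stepA (PySem.List.sorted arr (fun x => x) false)) (-1) 0 := by
    unfold solution stepA
    rfl
  have hB : solution_alt arr
      = ((PySem.List.sorted arr (fun x => x) false).length - 1)
        + ((PySem.List.min? ((1 : Int) ::
            (PySem.List.pyRange 1 ((PySem.List.sorted arr (fun x => x) false).length : Int) 1).map
              (fun j => PySem.List.pyGetD (PySem.List.sorted arr (fun x => x) false) j 0 - j))
            (fun y => y)).getD 0) := rfl
  rw [hA, hB, hs, foldA]
  -- A side: last element of the clamped list
  have hlast : PySem.List.pyGetD (1 :: goList 1 xs) (-1) 0 = clampF xs 1 := by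
    have h := lastGo xs 1
    have hne : (1 :: goList 1 xs : List Int) ≠ [] := by simp
    rw [PySem.List.pyGetD_neg_one _ 0 hne, ← Option.some_inj, ← List.getLast?_eq_some_getLast, h]
  rw [hlast]
  -- B side: the min over the comprehension
  rw [PySem.List.min?_id_cons, Option.getD_some, List.foldl_map,
    show (fun (m j : Int) => min m (PySem.List.pyGetD (x :: xs) j 0 - j))
      = (fun m j => Min.min m ((fun j => PySem.List.pyGetD (x :: xs) j 0 - j) j)) from rfl]
  have hb := bfoldB xs (x :: xs) 1 1 (by omega) (by rfl)
  rw [List.foldl_map] at hb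
  rw [hb]
  have hc := clampF_eq_bfold xs 1 1
  simp only [show (1 : Int) - 1 + 1 = 1 from by ring] at hc
  rw [hc]
  simp [List.length_cons]
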